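-- pv_equiv track=rewrite | github.com/RAJBIR-SINGH-NITT/AI-Bot--Smart-Auto-Reply-Bot | AiBot.py | extract_last_line
-- ===== SOURCE A (Python) =====
-- def extract_last_line(chat_text):
--     lines = chat_text.split("\n")
--     last = ""
--     for line in reversed(lines):
--         if line.strip() != "":
--             last = line.strip()
--             break
--     return last
-- ===== SOURCE B (Python) =====
-- def extract_last_line(chat_text):
--     last = ""
--     for line in chat_text.split("\n"):
--         s = line.strip()
--         if s != "":
--             last = s
--     return last
-- ===== Notes on version B (the rewrite author's own statement) =====
-- stated objective: simpler
-- what changed: Forward single pass keeping an overwriting accumulator of the latest non-empty stripped line, instead of reversing the line list and breaking at the first hit.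
import Mathlib
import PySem

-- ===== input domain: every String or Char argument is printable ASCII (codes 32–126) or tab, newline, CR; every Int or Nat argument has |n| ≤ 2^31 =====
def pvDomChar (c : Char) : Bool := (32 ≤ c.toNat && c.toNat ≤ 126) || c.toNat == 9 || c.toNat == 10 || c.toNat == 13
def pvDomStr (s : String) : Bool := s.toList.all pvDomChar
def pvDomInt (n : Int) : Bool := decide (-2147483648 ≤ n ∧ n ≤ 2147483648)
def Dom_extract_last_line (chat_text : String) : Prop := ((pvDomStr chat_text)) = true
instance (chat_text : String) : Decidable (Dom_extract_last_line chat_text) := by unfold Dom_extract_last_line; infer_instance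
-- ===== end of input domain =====

-- B replaces A's reversed scan with an early break by a forward single pass keeping the latest non-empty stripped line (objective: simpler).

-- ===== PORT A =====
-- 'for line in reversed(lines): if line.strip() != "": last = line.strip(); break' — first hit in the reversed list, else ""
def pvFindRev : List String → String
  | [] => ""
  | l :: rest => if PySem.Str.strip l ≠ "" then PySem.Str.strip l else pvFindRev rest

def extract_last_line (chat_text : String) : String :=
  pvFindRev ((PySem.Str.split? chat_text "\n").getD []).reverse

-- ===== PORT B =====
-- forward loop overwriting the accumulator with each non-empty stripped line
def extract_last_line_alt (chat_text : String) : String :=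
  ((PySem.Str.split? chat_text "\n").getD []).foldl
    (fun last line => let s := PySem.Str.strip line; if s ≠ "" then s else last) ""

-- ===== PRECONDITION & SPEC =====
def Spec_extract_last_line (chat_text : String) (out : String) : Prop := out = extract_last_line_alt chat_text
instance (chat_text : String) (out : String) : Decidable (Spec_extract_last_line chat_text out) := by unfold Spec_extract_last_line; infer_instance

-- ===== CLAIM (what is proved, stated in full; the proofs are below) =====
def Claim_equal_extract_last_line : Prop := ∀ (chat_text : String), Dom_extract_last_line chat_text → Spec_extract_last_line chat_text (extract_last_line chat_text)

-- ===== LEMMAS AND PROOFS =====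

-- pvFindRev returns "" only when nothing is found, so scanning ys ++ zs is: take ys's hit if any, else zs's
lemma pvFindRev_append (ys zs : List String) :
    pvFindRev (ys ++ zs) = if pvFindRev ys ≠ "" then pvFindRev ys else pvFindRev zs := by
  induction ys with
  | nil => simp [pvFindRev]
  | cons y ys ih =>
    simp only [List.cons_append, pvFindRev]
    by_cases h : PySem.Str.strip y ≠ "" <;> simp [h, ih]

lemma foldl_eq_findRev (xs : List String) (a : String) :
    xs.foldl (fun last line => let s := PySem.Str.strip line; if s ≠ "" then s else last) a
      = if pvFindRev xs.reverse ≠ "" then pvFindRev xs.reverse else a := by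
  induction xs generalizing a with
  | nil => simp [pvFindRev]
  | cons x xs ih =>
    simp only [List.foldl_cons, List.reverse_cons, pvFindRev_append, ih]
    by_cases h : pvFindRev xs.reverse ≠ "" <;>
      by_cases h2 : PySem.Str.strip x ≠ "" <;>
      simp [pvFindRev, h, h2]

-- ===== VERDICT (by name: the statement is the Claim_ definition above) =====
theorem extract_last_line_spec : Claim_equal_extract_last_line := by
  intro chat_text _
  unfold Spec_extract_last_line extract_last_line extract_last_line_alt
  rw [foldl_eq_findRev]
  by_cases h : pvFindRev ((PySem.Str.split? chat_text "\n").getD []).reverse ≠ "" <;>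
    simp_all
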